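-- pv_equiv track=rewrite | github.com/luobingsong123/pythonProject | HQM/pcap_parse_metawatch.py | cal_delay
-- ===== SOURCE A (Python) =====
-- def cal_delay(tick_timestamp, trade_timestamp):
--     delay = []
--     i = 0
--     while i < len(tick_timestamp):
--         delays = trade_timestamp[i] - tick_timestamp[i]
--         if delays > 5000000:
--             tick_timestamp.pop(i)
--             continue
--         delay.append(delays)
--         i += 1
--     return delay
-- ===== SOURCE B (Python) =====
-- def cal_delay(tick_timestamp, trade_timestamp):
--     # Single forward pass over the original ticks: the accepted count is the
--     # next trade index. Keeps A's in-place mutation of tick_timestamp via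
--     # slice assignment. Side effect matches A; equivalence proved on return value.
--     delay = []
--     kept = []
--     for t in tick_timestamp:
--         d = trade_timestamp[len(delay)] - t
--         if d <= 5000000:
--             delay.append(d)
--             kept.append(t)
--     tick_timestamp[:] = kept
--     return delay
-- ===== Notes on version B (the rewrite author's own statement) =====
-- stated objective: alternative
-- what changed: Replaces the index-rewinding while loop with pop(i) (each pop shifts the tail) by one forward pass over the original ticks using the accepted count as the trade index, rebuilding the kept-tick list and writing it back with one slice assignment; intended as faster but a timing run measured only ~1.4x at the largest size, so no speed is claimed.
import Mathlib
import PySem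

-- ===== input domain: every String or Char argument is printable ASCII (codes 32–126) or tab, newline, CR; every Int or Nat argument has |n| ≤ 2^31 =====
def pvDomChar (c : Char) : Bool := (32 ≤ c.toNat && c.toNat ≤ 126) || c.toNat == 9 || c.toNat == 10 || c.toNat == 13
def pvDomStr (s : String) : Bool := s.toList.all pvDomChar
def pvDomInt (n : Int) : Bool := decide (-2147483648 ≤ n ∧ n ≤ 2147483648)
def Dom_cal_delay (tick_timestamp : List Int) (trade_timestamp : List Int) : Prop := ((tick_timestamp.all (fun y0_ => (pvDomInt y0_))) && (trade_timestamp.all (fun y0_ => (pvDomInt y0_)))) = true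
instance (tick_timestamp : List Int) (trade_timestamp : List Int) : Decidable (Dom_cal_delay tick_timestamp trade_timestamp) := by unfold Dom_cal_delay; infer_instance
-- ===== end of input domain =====

-- B replaces A's pop(i)-rewinding while loop by one forward pass (accepted count = trade index),
-- writing the kept ticks back by slice assignment; both mutate tick_timestamp identically inside
-- Pre_, and the equivalence proved here is about the return value.

-- ===== PORT A =====
-- the while loop: state (tick_timestamp, i, delay); pop(i) = eraseIdx i (i is in range here);
-- trade_timestamp[i]/tick_timestamp[i] via pyGet? (none = IndexError, excluded by Pre_; the port returns delay there)
def cal_delay_loop (tick : List Int) (trade : List Int) (i : Nat) (delay : List Int) : List Int :=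
  if h : i < tick.length then
    match PySem.List.pyGet? trade (i : Int), PySem.List.pyGet? tick (i : Int) with
    | some tr, some tk =>
      let delays := tr - tk
      if delays > 5000000 then
        cal_delay_loop (tick.eraseIdx i) trade i delay
      else
        cal_delay_loop tick trade (i + 1) (delay ++ [delays])
    | _, _ => delay
  else delay
termination_by tick.length - i
decreasing_by
  · have := List.length_eraseIdx_of_lt h; omega
  · omega

def cal_delay (tick_timestamp : List Int) (trade_timestamp : List Int) : List Int :=
  cal_delay_loop tick_timestamp trade_timestamp 0 []

-- ===== PORT B =====
-- one fold over the original ticks; state = (delay, kept); trade index = len(delay)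
def cal_delay_alt_step (trade : List Int) (st : List Int × List Int) (t : Int) : List Int × List Int :=
  match PySem.List.pyGet? trade (st.1.length : Int) with
  | some tr =>
    let d := tr - t
    if d ≤ 5000000 then (st.1 ++ [d], st.2 ++ [t]) else st
  | none => st

def cal_delay_alt (tick_timestamp : List Int) (trade_timestamp : List Int) : List Int :=
  (tick_timestamp.foldl (cal_delay_alt_step trade_timestamp) ([], [])).1

-- ===== PRECONDITION & SPEC =====
-- Pre_ is EXACT: A (and B alike) raises IndexError precisely when the trade stream runs out
-- while ticks remain — each tick either consumes the current trade (accepted, delay ≤ 5000000)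
-- or is dropped against it. pvTradesSuffice states that consumption succeeds; it excludes
-- exactly the IndexError inputs and admits every input on which A returns.
def pvTradesSuffice : List Int → List Int → Prop
  | [], _ => True
  | _ :: _, [] => False
  | t :: ts, tr :: trs => if tr - t > 5000000 then pvTradesSuffice ts (tr :: trs) else pvTradesSuffice ts trs

def Pre_cal_delay (tick_timestamp : List Int) (trade_timestamp : List Int) : Prop :=
  pvTradesSuffice tick_timestamp trade_timestamp
instance (tick_timestamp : List Int) (trade_timestamp : List Int) : Decidable (Pre_cal_delay tick_timestamp trade_timestamp) := by
  unfold Pre_cal_delay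
  induction tick_timestamp generalizing trade_timestamp with
  | nil => exact isTrue trivial
  | cons t ts ih =>
    cases trade_timestamp with
    | nil => exact isFalse (fun h => h)
    | cons tr trs =>
      unfold pvTradesSuffice
      exact if h : tr - t > 5000000 then by rw [if_pos h]; exact ih _ else by rw [if_neg h]; exact ih _

def pvWitness_cal_delay : List Int × List Int := ([1, 2, 9000000], [4, 6000003, 9000005])

def Spec_cal_delay (tick_timestamp : List Int) (trade_timestamp : List Int) (out : List Int) : Prop := out = cal_delay_alt tick_timestamp trade_timestamp
instance (tick_timestamp : List Int) (trade_timestamp : List Int) (out : List Int) : Decidable (Spec_cal_delay tick_timestamp trade_timestamp out) := by unfold Spec_cal_delay; infer_instance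

-- ===== CLAIM (what is proved, stated in full; the proofs are below) =====
def Claim_equal_cal_delay : Prop := ∀ (tick_timestamp : List Int) (trade_timestamp : List Int), Dom_cal_delay tick_timestamp trade_timestamp → Pre_cal_delay tick_timestamp trade_timestamp → Spec_cal_delay tick_timestamp trade_timestamp (cal_delay tick_timestamp trade_timestamp)

-- ===== LEMMAS AND PROOFS =====

theorem pv_eraseIdx_append_cons {α : Type} (pre : List α) (t : α) (rs : List α) :
    (pre ++ t :: rs).eraseIdx pre.length = pre ++ rs := by
  induction pre with
  | nil => rfl
  | cons a l ih => simpa [List.eraseIdx] using ih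

-- Invariant: A's loop at state (pre ++ rest, i = |pre|, delay) with |delay| = |pre| computes
-- delay continued by B's fold over rest from state (delay, kept), provided the remaining
-- trade suffix trade.drop |pre| suffices for rest.
theorem cal_delay_loop_eq_fold (trade : List Int) (rest pre delay kept : List Int)
    (hlen : delay.length = pre.length)
    (hok : pvTradesSuffice rest (trade.drop pre.length)) :
    cal_delay_loop (pre ++ rest) trade pre.length delay
      = (rest.foldl (cal_delay_alt_step trade) (delay, kept)).1 := by
  induction rest generalizing pre delay kept with
  | nil =>
    rw [cal_delay_loop]
    simp
  | cons t rs ih =>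
    have hdrop_ne : trade.drop pre.length ≠ [] := by
      intro hnil; rw [hnil] at hok; exact hok
    have hplt : pre.length < trade.length := by
      by_contra hge
      exact hdrop_ne (List.drop_eq_nil_of_le (by omega))
    rw [cal_delay_loop]
    have hi : pre.length < (pre ++ t :: rs).length := by simp
    have htr : PySem.List.pyGet? trade (pre.length : Int) = some (trade[pre.length]'hplt) := by
      rw [PySem.List.pyGet?_natCast]
      exact List.getElem?_eq_getElem hplt
    have htk : PySem.List.pyGet? (pre ++ t :: rs) (pre.length : Int) = some t :=
      PySem.List.pyGet?_append_length pre rs t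
    rw [dif_pos hi, htr, htk]
    simp only [List.foldl_cons, cal_delay_alt_step, hlen, htr]
    have hdropcons : trade.drop pre.length = trade[pre.length]'hplt :: trade.drop (pre.length + 1) :=
      List.drop_eq_getElem_cons hplt
    rw [hdropcons] at hok
    set tr := trade[pre.length]'hplt with htrdef
    by_cases hd : tr - t > 5000000
    · rw [if_pos hd]
      have herase : (pre ++ t :: rs).eraseIdx pre.length = pre ++ rs :=
        pv_eraseIdx_append_cons pre t rs
      rw [herase, if_neg (by omega)]
      have hok' : pvTradesSuffice rs (trade.drop pre.length) := by
        unfold pvTradesSuffice at hok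
        rw [if_pos hd] at hok
        rwa [hdropcons]
      exact ih pre delay kept hlen hok'
    · rw [if_neg hd, if_pos (by omega)]
      have hok' : pvTradesSuffice rs (trade.drop (pre.length + 1)) := by
        unfold pvTradesSuffice at hok
        rwa [if_neg hd] at hok
      have h1 : pre.length + 1 = (pre ++ [t]).length := by simp
      have h2 : pre ++ t :: rs = (pre ++ [t]) ++ rs := by simp
      rw [h1, h2]
      exact ih (pre ++ [t]) (delay ++ [tr - t]) (kept ++ [t])
        (by simp [hlen]) (by rw [← h1]; exact hok')

-- ===== VERDICT (by name: the statement is the Claim_ definition above) =====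
theorem cal_delay_spec : Claim_equal_cal_delay := by
  intro tick trade _ hpre
  unfold Spec_cal_delay cal_delay cal_delay_alt
  have := cal_delay_loop_eq_fold trade tick [] [] [] rfl (by simpa using hpre)
  simpa using this
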